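-- pv_equiv track=rewrite | github.com/JianqiaoMao/Real-time-Vision-based-Sign-Language-Recognition-System | gesture_recognition_system.py | contUpEdge
-- ===== SOURCE A (Python) =====
-- def contUpEdge(li,contNum):
--     zeroCount=0
--     oneCount=0
--     locker=0
--     le=9999
--     for i in range(len(li)):
--         if li[i]==0:
--             zeroCount+=1
--             if zeroCount==contNum and locker==0:
--                 locker=1
--                 le=i-contNum+1
--             oneCount=0
--         else:
--             oneCount+=1
--             if oneCount<80:
--                 None
--             else:
--                 le=9999
--                 break
--             zeroCount=0
--     return le
-- ===== SOURCE B (Python) =====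
-- from itertools import groupby
--
-- def contUpEdge(li, contNum):
--     le = 9999
--     found = False
--     pos = 0
--     for iszero, grp in groupby(li, key=lambda x: x == 0):
--         n = sum(1 for _ in grp)
--         if not iszero:
--             if n >= 80:
--                 return 9999
--         elif not found and contNum >= 1 and n >= contNum:
--             le = pos
--             found = True
--         pos += n
--     return le
-- ===== Notes on version B (the rewrite author's own statement) =====
-- stated objective: idiomatic
-- what changed: Replaces the per-element zero/one counters, locker flag and break with a single itertools.groupby pass over maximal runs: a zero run of length >= contNum records its start index once, a non-zero run of length >= 80 returns 9999 immediately.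
import Mathlib
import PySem

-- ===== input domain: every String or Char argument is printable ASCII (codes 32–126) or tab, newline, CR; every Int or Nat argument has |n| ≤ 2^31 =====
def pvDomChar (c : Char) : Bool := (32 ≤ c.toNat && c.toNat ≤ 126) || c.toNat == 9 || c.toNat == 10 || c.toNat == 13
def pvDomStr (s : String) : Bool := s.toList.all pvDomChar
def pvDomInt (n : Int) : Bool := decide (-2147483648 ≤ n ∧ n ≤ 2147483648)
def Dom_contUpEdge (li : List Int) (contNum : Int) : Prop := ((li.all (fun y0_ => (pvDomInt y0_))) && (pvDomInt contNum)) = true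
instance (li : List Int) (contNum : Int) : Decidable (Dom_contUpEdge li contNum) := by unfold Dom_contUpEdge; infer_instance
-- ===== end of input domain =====

-- B replaces A's per-element counters/locker/break with one itertools.groupby pass over maximal runs (idiomatic decomposition; same cost).

-- ===== PORT A =====
-- loop of A, element by element; state = (index i, zeroCount, oneCount, locker, le); 'break' = returning 9999 directly
def contUpEdgeGo (contNum : Int) : List Int → Int → Int → Int → Int → Int → Int
  | [], _, _, _, _, le => le
  | x :: rest, i, zeroCount, oneCount, locker, le =>
    if x = 0 then
      let zeroCount' := zeroCount + 1
      let locker' := if zeroCount' = contNum ∧ locker = 0 then 1 else locker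
      let le' := if zeroCount' = contNum ∧ locker = 0 then i - contNum + 1 else le
      contUpEdgeGo contNum rest (i + 1) zeroCount' 0 locker' le'
    else
      let oneCount' := oneCount + 1
      if oneCount' < 80 then
        contUpEdgeGo contNum rest (i + 1) 0 oneCount' locker le
      else
        9999

def contUpEdge (li : List Int) (contNum : Int) : Int :=
  contUpEdgeGo contNum li 0 0 0 0 9999

-- ===== PORT B =====
-- groupby(li, key=lambda x: x == 0): list of maximal runs as (key, run length)
def pyGroupRuns : List Int → List (Bool × Nat)
  | [] => []
  | x :: xs =>
    let k := x == 0
    (k, (xs.takeWhile (fun y => (y == 0) == k)).length + 1)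
      :: pyGroupRuns (xs.dropWhile (fun y => (y == 0) == k))
termination_by l => l.length
decreasing_by
  simp only [List.length_cons]
  exact Nat.lt_succ_of_le (List.length_dropWhile_le _ _)

-- the for-loop of B over the runs; state = (pos, found, le); 'return 9999' = returning directly
def contUpEdgeAltGo (contNum : Int) : List (Bool × Nat) → Int → Bool → Int → Int
  | [], _, _, le => le
  | (iszero, n) :: rs, pos, found, le =>
    if !iszero then
      if (n : Int) ≥ 80 then 9999
      else contUpEdgeAltGo contNum rs (pos + n) found le
    else if !found ∧ contNum ≥ 1 ∧ (n : Int) ≥ contNum then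
      contUpEdgeAltGo contNum rs (pos + n) true pos
    else
      contUpEdgeAltGo contNum rs (pos + n) found le

def contUpEdge_alt (li : List Int) (contNum : Int) : Int :=
  contUpEdgeAltGo contNum (pyGroupRuns li) 0 false 9999

-- ===== PRECONDITION & SPEC =====
def Spec_contUpEdge (li : List Int) (contNum : Int) (out : Int) : Prop := out = contUpEdge_alt li contNum
instance (li : List Int) (contNum : Int) (out : Int) : Decidable (Spec_contUpEdge li contNum out) := by unfold Spec_contUpEdge; infer_instance

-- ===== CLAIM (what is proved, stated in full; the proofs are below) =====
def Claim_equal_contUpEdge : Prop := ∀ (li : List Int) (contNum : Int), Dom_contUpEdge li contNum → Spec_contUpEdge li contNum (contUpEdge li contNum)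

-- ===== LEMMAS AND PROOFS =====

-- processing a block of zeros with zero-counter zc: the match fires exactly if zc < contNum ≤ zc + |run| and locker = 0, at le = i - zc
theorem goZero (contNum : Int) (run : List Int) (h : ∀ x ∈ run, x = 0) :
    ∀ (rest : List Int) (i zc oc locker le : Int),
    contUpEdgeGo contNum (run ++ rest) i zc oc locker le =
      contUpEdgeGo contNum rest (i + run.length) (zc + run.length)
        (if run.length = 0 then oc else 0)
        (if locker = 0 ∧ zc < contNum ∧ contNum ≤ zc + run.length then 1 else locker)
        (if locker = 0 ∧ zc < contNum ∧ contNum ≤ zc + run.length then i - zc else le) := by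
  induction run with
  | nil =>
    intro rest i zc oc locker le
    simp only [List.nil_append, List.length_nil, Nat.cast_zero, add_zero]
    have hc : ¬ (locker = 0 ∧ zc < contNum ∧ contNum ≤ zc) := by
      rintro ⟨-, a, b⟩; omega
    rw [if_pos trivial, if_neg hc, if_neg hc]
  | cons x xs ih =>
    intro rest i zc oc locker le
    have hx : x = 0 := h x (List.mem_cons_self ..)
    have hxs : ∀ y ∈ xs, y = 0 := fun y hy => h y (List.mem_cons_of_mem _ hy)
    simp only [List.cons_append, contUpEdgeGo, if_pos hx]
    rw [ih hxs]
    simp only [List.length_cons]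
    push_cast
    split_ifs with h1 h2 h3 h4 h5 h6 h7 h8 <;>
      first
        | rfl
        | omega
        | (congr 1 <;> omega)

-- processing a block of nonzeros with one-counter oc: break (9999) exactly if oc + |run| reaches 80
theorem goNonzero (contNum : Int) (run : List Int) (h : ∀ x ∈ run, x ≠ 0) :
    ∀ (rest : List Int) (i zc oc locker le : Int),
    contUpEdgeGo contNum (run ++ rest) i zc oc locker le =
      if oc + (run.length : Int) ≥ 80 ∧ run.length ≠ 0 then 9999
      else contUpEdgeGo contNum rest (i + run.length)
        (if run.length = 0 then zc else 0) (oc + run.length) locker le := by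
  induction run with
  | nil =>
    intro rest i zc oc locker le
    simp
  | cons x xs ih =>
    intro rest i zc oc locker le
    have hx : x ≠ 0 := h x (List.mem_cons_self ..)
    have hxs : ∀ y ∈ xs, y ≠ 0 := fun y hy => h y (List.mem_cons_of_mem _ hy)
    simp only [List.cons_append, contUpEdgeGo, if_neg hx]
    by_cases hb : oc + 1 < 80
    · rw [if_pos hb, ih hxs]
      simp only [List.length_cons]
      push_cast
      split_ifs with h1 h2 h3 h4 <;>
        first
          | rfl
          | omega
          | (congr 1 <;> omega)
    · rw [if_neg hb]
      simp only [List.length_cons]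
      push_cast
      have hc : oc + ((xs.length : Int) + 1) ≥ 80 ∧ xs.length + 1 ≠ 0 := ⟨by omega, by omega⟩
      rw [if_pos hc]

theorem head_dropWhile_false {p : Int → Bool} (l : List Int) (y : Int)
    (h : (l.dropWhile p).head? = some y) : p y = false := by
  induction l with
  | nil => simp at h
  | cons a l ih =>
    rw [List.dropWhile_cons] at h
    by_cases hp : p a
    · exact ih (by simpa [hp] using h)
    · have : a = y := by simpa [hp] using h
      simpa [this] using hp

-- run-boundary invariant: A's element loop equals B's run loop, with found ↔ locker = 1,
-- provided the counter relevant to the head's key is 0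
theorem key (contNum : Int) : ∀ (n : ℕ) (li : List Int), li.length ≤ n →
    ∀ (i zc oc le : Int) (found : Bool),
    (∀ h0, li.head? = some h0 → (h0 = 0 → zc = 0) ∧ (h0 ≠ 0 → oc = 0)) →
    contUpEdgeGo contNum li i zc oc (if found then 1 else 0) le =
      contUpEdgeAltGo contNum (pyGroupRuns li) i found le := by
  intro n
  induction n with
  | zero =>
    intro li hlen i zc oc le found _
    have : li = [] := List.length_eq_zero_iff.mp (Nat.le_zero.mp hlen)
    subst this
    simp [contUpEdgeGo, pyGroupRuns, contUpEdgeAltGo]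
  | succ n ih =>
    intro li hlen i zc oc le found hhead
    cases li with
    | nil => simp [contUpEdgeGo, pyGroupRuns, contUpEdgeAltGo]
    | cons x xs =>
      have hh := hhead x rfl
      rw [pyGroupRuns]
      by_cases hx : x = 0
      · -- zero run
        have hk : (x == 0) = true := by simp [hx]
        simp only [hk]
        set run := xs.takeWhile (fun y => (y == 0) == true) with hrun
        set rest := xs.dropWhile (fun y => (y == 0) == true) with hrest
        have hsplit : x :: xs = (x :: run) ++ rest := by
          simp [hrun, hrest, List.takeWhile_append_dropWhile]
        have hall : ∀ y ∈ x :: run, y = 0 := by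
          intro y hy
          rcases List.mem_cons.mp hy with h | h
          · exact h ▸ hx
          · have := List.mem_takeWhile_imp h
            simpa using this
        have hzc : zc = 0 := hh.1 hx
        rw [hsplit, goZero contNum (x :: run) hall]
        subst hzc
        have hlen2 : rest.length ≤ n := by
          have h1 : rest.length ≤ xs.length := List.length_dropWhile_le _ _
          simp only [List.length_cons] at hlen
          omega
        have hne : (x :: run).length ≠ 0 := by simp
        have hc2 : ¬ ((!(true : Bool)) = true) := by simp
        have hhr : ∀ h0, rest.head? = some h0 → (h0 = 0 → ((0:Int) + ((x :: run).length : Int)) = 0) ∧ (h0 ≠ 0 → (0:Int) = 0) := by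
          intro h0 hh0
          have hnz := head_dropWhile_false (p := fun y => (y == 0) == true) xs h0 hh0
          exact ⟨fun h00 => absurd h00 (by simpa using hnz), fun _ => rfl⟩
        by_cases hc : (if found then (1:Int) else 0) = 0 ∧ (0:Int) < contNum ∧ contNum ≤ 0 + ((x :: run).length : Int)
        · have hfound : found = false := by
            cases found
            · rfl
            · exfalso; simpa using hc.1
          rw [if_pos hc, if_pos hc, if_neg hne]
          rw [contUpEdgeAltGo, if_neg hc2]
          have hc3 : (!found) = true ∧ contNum ≥ 1 ∧ ((((run.length + 1 : ℕ)) : Int) ≥ contNum) := by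
            refine ⟨by simp [hfound], by have := hc.2.1; omega, ?_⟩
            have hN := hc.2.2
            simp only [List.length_cons] at hN
            push_cast at hN ⊢
            omega
          rw [if_pos hc3]
          have hrec := ih rest hlen2 (i + ((x :: run).length : Int)) ((0:Int) + ((x :: run).length : Int)) 0 i true hhr
          rw [show (if (true : Bool) then (1:Int) else 0) = 1 from rfl] at hrec
          rw [show i - (0:Int) = i by ring]
          rw [hrec]
          congr 1
        · rw [if_neg hc, if_neg hc, if_neg hne]
          rw [contUpEdgeAltGo, if_neg hc2]
          have hc3 : ¬ ((!found) = true ∧ contNum ≥ 1 ∧ ((((run.length + 1 : ℕ)) : Int) ≥ contNum)) := by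
            rintro ⟨hf, hge1, hgeN⟩
            apply hc
            refine ⟨?_, by omega, ?_⟩
            · cases found
              · rfl
              · simp at hf
            · simp only [List.length_cons]
              push_cast at hgeN ⊢
              omega
          rw [if_neg hc3]
          have hrec := ih rest hlen2 (i + ((x :: run).length : Int)) ((0:Int) + ((x :: run).length : Int)) 0 le found hhr
          rw [hrec]
          congr 1
      · -- nonzero run
        have hk : (x == 0) = false := by simp [hx]
        simp only [hk]
        set run := xs.takeWhile (fun y => (y == 0) == false) with hrun
        set rest := xs.dropWhile (fun y => (y == 0) == false) with hrest
        have hsplit : x :: xs = (x :: run) ++ rest := by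
          simp [hrun, hrest, List.takeWhile_append_dropWhile]
        have hall : ∀ y ∈ x :: run, y ≠ 0 := by
          intro y hy
          rcases List.mem_cons.mp hy with h | h
          · exact h ▸ hx
          · have := List.mem_takeWhile_imp h
            simpa using this
        have hoc : oc = 0 := hh.2 hx
        subst hoc
        rw [hsplit, goNonzero contNum (x :: run) hall]
        rw [contUpEdgeAltGo]
        rw [if_pos (show (!(false : Bool)) = true from rfl)]
        have hlen2 : rest.length ≤ n := by
          have h1 : rest.length ≤ xs.length := List.length_dropWhile_le _ _
          simp only [List.length_cons] at hlen
          omega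
        have hne : (x :: run).length ≠ 0 := by simp
        by_cases hbig : (0:Int) + (((x :: run).length : ℕ) : Int) ≥ 80 ∧ (x :: run).length ≠ 0
        · rw [if_pos hbig]
          have : ((((run.length + 1 : ℕ)) : Int)) ≥ 80 := by
            have hb := hbig.1
            simp only [List.length_cons] at hb
            push_cast at hb ⊢
            omega
          rw [if_pos this]
        · rw [if_neg hbig]
          have hsmall : ¬ ((((run.length + 1 : ℕ)) : Int) ≥ 80) := by
            intro habs
            apply hbig
            refine ⟨?_, hne⟩
            simp only [List.length_cons]
            push_cast at habs ⊢
            omega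
          rw [if_neg hsmall, if_neg hne]
          have hhr : ∀ h0, rest.head? = some h0 → (h0 = 0 → (0:Int) = 0) ∧ (h0 ≠ 0 → ((0:Int) + ((x :: run).length : Int)) = 0) := by
            intro h0 hh0
            have hz := head_dropWhile_false (p := fun y => (y == 0) == false) xs h0 hh0
            refine ⟨fun _ => rfl, fun hne0 => ?_⟩
            exfalso
            apply hne0
            simpa using hz
          have hrec := ih rest hlen2 (i + ((x :: run).length : Int)) 0 ((0:Int) + ((x :: run).length : Int)) le found hhr
          rw [hrec]
          congr 1

-- ===== VERDICT (by name: the statement is the Claim_ definition above) =====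
theorem contUpEdge_spec : Claim_equal_contUpEdge := by
  intro li contNum _
  unfold Spec_contUpEdge contUpEdge contUpEdge_alt
  have := key contNum li.length li le_rfl 0 0 0 9999 false
    (by intro h0 _; exact ⟨fun _ => rfl, fun _ => rfl⟩)
  simpa using this
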